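-- pv_equiv track=rewrite | github.com/muelli/gnome-keysign-glade-ui | gnome-keysign.py | format_fpr
-- ===== SOURCE A (Python) =====
-- def format_fpr(fpr):
--     res_fpr = ""
--     for i in range(0, len(fpr), 4):
--         res_fpr += fpr[i:i+4]
--         if i != 0 and (i+4) % 20 == 0:
--             res_fpr += "\n"
--         else:
--             res_fpr += " "
--     res_fpr = res_fpr.rstrip()
--     return res_fpr
-- ===== SOURCE B (Python) =====
-- def format_fpr(fpr):
--     chunks = [fpr[i:i+4] for i in range(0, len(fpr), 4)]
--     lines = [" ".join(chunks[j:j+5]) for j in range(0, len(chunks), 5)]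
--     return "\n".join(lines).rstrip()
-- ===== Notes on version B (the rewrite author's own statement) =====
-- stated objective: simpler
-- what changed: Replaces A's single accumulation loop with its modular newline test (i+4)%20==0 by a two-stage decomposition: build the list of 4-char chunks, group them into lines of 5 chunks joined by spaces, and join the lines with newlines before the final rstrip.
import Mathlib
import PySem

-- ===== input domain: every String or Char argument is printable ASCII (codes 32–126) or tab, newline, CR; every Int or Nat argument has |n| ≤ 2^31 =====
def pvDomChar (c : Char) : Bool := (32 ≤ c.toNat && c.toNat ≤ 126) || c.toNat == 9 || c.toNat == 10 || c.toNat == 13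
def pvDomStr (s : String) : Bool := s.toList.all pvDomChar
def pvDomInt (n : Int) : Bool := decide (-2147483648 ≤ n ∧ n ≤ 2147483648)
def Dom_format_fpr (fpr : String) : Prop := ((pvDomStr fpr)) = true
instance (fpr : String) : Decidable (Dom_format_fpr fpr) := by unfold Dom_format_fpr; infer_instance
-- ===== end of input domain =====

-- B replaces A's single accumulation loop with a build-chunks / group-into-lines decomposition (simpler; same cost).

-- ===== PORT A =====
-- A's loop body: append the 4-char slice, then "\n" after every 20th position, else " "
def pvStepA (cs : List Char) (acc : List Char) (i : Int) : List Char :=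
  if i ≠ 0 ∧ PySem.Int.mod (i + 4) 20 = 0
  then acc ++ PySem.Chars.slice cs (some i) (some (i + 4)) ++ ['\n']
  else acc ++ PySem.Chars.slice cs (some i) (some (i + 4)) ++ [' ']

def format_fpr (fpr : String) : String :=
  String.ofList (PySem.Chars.rstrip
    ((PySem.List.pyRange 0 (fpr.toList.length : Int) 4).foldl (pvStepA fpr.toList) []))

-- ===== PORT B =====
-- chunks = [fpr[i:i+4] for i in range(0, len(fpr), 4)]
def pvChunksOf (cs : List Char) : List (List Char) :=
  (PySem.List.pyRange 0 (cs.length : Int) 4).map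
    (fun i => PySem.Chars.slice cs (some i) (some (i + 4)))

-- lines = [" ".join(chunks[j:j+5]) for j in range(0, len(chunks), 5)]
def pvLinesOf (chunks : List (List Char)) : List (List Char) :=
  (PySem.List.pyRange 0 (chunks.length : Int) 5).map
    (fun j => PySem.Chars.join [' '] (PySem.List.slice chunks (some j) (some (j + 5))))

def format_fpr_alt (fpr : String) : String :=
  String.ofList (PySem.Chars.rstrip
    (PySem.Chars.join ['\n'] (pvLinesOf (pvChunksOf fpr.toList))))

-- ===== PRECONDITION & SPEC =====
def Spec_format_fpr (fpr : String) (out : String) : Prop := out = format_fpr_alt fpr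
instance (fpr : String) (out : String) : Decidable (Spec_format_fpr fpr out) := by unfold Spec_format_fpr; infer_instance

-- ===== CLAIM (what is proved, stated in full; the proofs are below) =====
def Claim_equal_format_fpr : Prop := ∀ (fpr : String), Dom_format_fpr fpr → Spec_format_fpr fpr (format_fpr fpr)

-- ===== LEMMAS AND PROOFS =====

-- the separator A appends after the k-th 4-char chunk (its test 'i ≠ 0 ∧ (i+4) % 20 = 0' at i = 4k is '(k+1) % 5 = 0')
def pvSep (k : Nat) : List Char := if (k + 1) % 5 = 0 then ['\n'] else [' ']

-- the k-th 4-char chunk of cs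
def pvChunk (cs : List Char) (k : Nat) : List Char := (cs.drop (4 * k)).take 4

-- A's accumulation loop over chunk indices 0..K-1
def pvA (f : Nat → List Char) (K : Nat) : List Char :=
  (List.range K).foldl (fun acc k => acc ++ f k ++ pvSep k) []

-- B's lines: groups of 5 chunks joined by spaces
def pvLines (f : Nat → List Char) (K : Nat) : List (List Char) :=
  (List.range ((K + 4) / 5)).map
    (fun q => PySem.Chars.join [' '] ((((List.range K).map f).drop (5 * q)).take 5))

def pvB (f : Nat → List Char) (K : Nat) : List Char :=
  PySem.Chars.join ['\n'] (pvLines f K)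

theorem pvJoin_append (sep x : List Char) (ls : List (List Char)) (h : ls ≠ []) :
    PySem.Chars.join sep (ls ++ [x]) = PySem.Chars.join sep ls ++ sep ++ x := by
  induction ls with
  | nil => simp at h
  | cons a t ih =>
    cases t with
    | nil => simp [PySem.Chars.join_cons_cons, PySem.Chars.join_singleton]
    | cons b t' =>
      have := ih (by simp)
      simp only [List.cons_append, PySem.Chars.join_cons_cons] at this ⊢
      simp [this, List.append_assoc]

theorem pvRstrip_ws (s : List Char) (c : Char) (h : PySem.Chars.isspace c = true) :
    PySem.Chars.rstrip (s ++ [c]) = PySem.Chars.rstrip s := by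
  simp [PySem.Chars.rstrip, h]

theorem pvLines_succ (f : Nat → List Char) (K : Nat) (hK : 1 ≤ K) :
    pvB f (K + 1) = pvB f K ++ pvSep (K - 1) ++ f K := by
  have hlen : ((List.range K).map f).length = K := by simp
  have hsplit : (List.range (K + 1)).map f = (List.range K).map f ++ [f K] := by
    simp [List.range_succ]
  by_cases h5 : K % 5 = 0
  · -- a new line starts at chunk K
    have hq : (K + 1 + 4) / 5 = (K + 4) / 5 + 1 := by omega
    have hlines : pvLines f (K + 1) = pvLines f K ++ [f K] := by
      unfold pvLines
      rw [hsplit, hq, List.range_succ, List.map_append, List.map_singleton]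
      congr 1
      · apply List.map_congr_left
        intro q hq'
        have hq' : q < (K + 4) / 5 := List.mem_range.mp hq'
        rw [List.drop_append_of_le_length (by omega),
            List.take_append_of_le_length (by simp; omega)]
      · have h55 : 5 * ((K + 4) / 5) = K := by omega
        have hdrop : ((List.range K).map f).drop K = [] :=
          List.drop_of_length_le (by omega)
        rw [h55, List.drop_append_of_le_length (by omega), hdrop]
        simp [PySem.Chars.join_singleton]
    have hKne : pvLines f K ≠ [] := by
      apply List.ne_nil_of_length_pos
      simp [pvLines]
      omega
    have hsep : pvSep (K - 1) = ['\n'] := by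
      unfold pvSep; rw [if_pos (by omega)]
    rw [pvB, hlines, pvJoin_append _ _ _ hKne, ← pvB, hsep]
  · -- chunk K extends the current last line
    have hq : (K + 1 + 4) / 5 = K / 5 + 1 := by omega
    have hQ : (K + 4) / 5 = K / 5 + 1 := by omega
    have hsep : pvSep (K - 1) = [' '] := by
      unfold pvSep; rw [if_neg (by omega)]
    have hfrontK :
        ∀ q ∈ List.range (K / 5),
          PySem.Chars.join [' '] ((((List.range K).map f ++ [f K]).drop (5 * q)).take 5)
            = PySem.Chars.join [' '] ((((List.range K).map f).drop (5 * q)).take 5) := by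
      intro q hq'
      have hq' : q < K / 5 := List.mem_range.mp hq'
      rw [List.drop_append_of_le_length (by omega),
          List.take_append_of_le_length (by simp; omega)]
    have htail_ne : ((List.range K).map f).drop (5 * (K / 5)) ≠ [] := by
      apply List.ne_nil_of_length_pos
      simp [hlen]
      omega
    have hlast :
        PySem.Chars.join [' '] ((((List.range K).map f ++ [f K]).drop (5 * (K / 5))).take 5)
          = PySem.Chars.join [' '] ((((List.range K).map f).drop (5 * (K / 5))).take 5)
              ++ [' '] ++ f K := by
      rw [List.drop_append_of_le_length (by omega),
          List.take_of_length_le (by simp [hlen]; omega),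
          List.take_of_length_le (by simp [hlen]; omega)]
      exact pvJoin_append [' '] (f K) _ htail_ne
    have hlines : pvLines f (K + 1)
        = (List.range (K / 5)).map
            (fun q => PySem.Chars.join [' '] ((((List.range K).map f).drop (5 * q)).take 5))
          ++ [PySem.Chars.join [' '] ((((List.range K).map f).drop (5 * (K / 5))).take 5)
              ++ [' '] ++ f K] := by
      unfold pvLines
      rw [hsplit, hq, List.range_succ, List.map_append, List.map_singleton,
          List.map_congr_left hfrontK, hlast]
    have hlinesK : pvLines f K
        = (List.range (K / 5)).map
            (fun q => PySem.Chars.join [' '] ((((List.range K).map f).drop (5 * q)).take 5))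
          ++ [PySem.Chars.join [' '] ((((List.range K).map f).drop (5 * (K / 5))).take 5)] := by
      unfold pvLines
      rw [hQ, List.range_succ, List.map_append, List.map_singleton]
    rw [pvB, pvB, hlines, hlinesK, hsep]
    by_cases hfront : K / 5 = 0
    · simp [hfront, PySem.Chars.join_singleton, List.append_assoc]
    · have hne : (List.range (K / 5)).map
          (fun q => PySem.Chars.join [' '] ((((List.range K).map f).drop (5 * q)).take 5)) ≠ [] := by
        simp [List.range_eq_nil]
        omega
      rw [pvJoin_append _ _ _ hne, pvJoin_append _ _ _ hne]
      simp [List.append_assoc]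

theorem pvMain (f : Nat → List Char) (K : Nat) :
    pvA f K = if K = 0 then [] else pvB f K ++ pvSep (K - 1) := by
  induction K with
  | zero => simp [pvA]
  | succ K ih =>
    rw [pvA, List.range_succ, List.foldl_append]
    simp only [List.foldl_cons, List.foldl_nil]
    rw [← pvA, ih]
    by_cases h0 : K = 0
    · subst h0
      simp [pvB, pvLines, PySem.Chars.join_singleton]
    · rw [if_neg h0, if_neg (by omega), pvLines_succ f K (by omega)]
      have h1 : K + 1 - 1 = K := by omega
      rw [h1]

-- number of 4-char chunks
def pvK (cs : List Char) : Nat := (cs.length + 3) / 4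

theorem pvA_port (cs : List Char) :
    (PySem.List.pyRange 0 (cs.length : Int) 4).foldl (pvStepA cs) []
      = pvA (pvChunk cs) (pvK cs) := by
  rw [PySem.List.pyRange_of_pos 0 (cs.length : Int) (by norm_num), List.foldl_map]
  have hcount : (if (0:Int) < (cs.length : Int)
      then ((((cs.length : Int) - 0 + 4 - 1) / 4)).toNat else 0) = pvK cs := by
    unfold pvK; split <;> omega
  rw [hcount, pvA]
  congr 1
  funext acc k
  have hchunk : PySem.Chars.slice cs (some (0 + 4 * (k : Int))) (some (0 + 4 * (k : Int) + 4))
      = pvChunk cs k := by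
    have h1 : (0 + 4 * (k : Int)) = ((4 * k : Nat) : Int) := by push_cast; ring
    have h2 : (0 + 4 * (k : Int) + 4) = ((4 * k + 4 : Nat) : Int) := by push_cast; ring
    rw [h2, h1, PySem.Chars.slice_eq_listSlice, PySem.List.slice_natCast]
    unfold pvChunk
    congr 1
    omega
  have hcond : ((0 + 4 * (k : Int)) ≠ 0 ∧ PySem.Int.mod (0 + 4 * (k : Int) + 4) 20 = 0)
      ↔ (k + 1) % 5 = 0 := by
    rw [PySem.Int.mod_eq_zero_iff_dvd]
    constructor
    · rintro ⟨h1, h2⟩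
      have hk : (k : Int) ≠ 0 := by intro h; apply h1; rw [h]; ring
      omega
    · intro h
      exact ⟨by intro hc; omega, by omega⟩
  unfold pvStepA
  rw [hchunk]
  unfold pvSep
  by_cases hc : (k + 1) % 5 = 0
  · rw [if_pos (hcond.mpr hc), if_pos hc]
  · rw [if_neg (fun h => hc (hcond.mp h)), if_neg hc]

theorem pvB_port (cs : List Char) :
    PySem.Chars.join ['\n'] (pvLinesOf (pvChunksOf cs)) = pvB (pvChunk cs) (pvK cs) := by
  have hchunks : pvChunksOf cs = (List.range (pvK cs)).map (pvChunk cs) := by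
    unfold pvChunksOf
    rw [PySem.List.pyRange_of_pos 0 (cs.length : Int) (by norm_num), List.map_map]
    have hcount : (if (0:Int) < (cs.length : Int)
        then ((((cs.length : Int) - 0 + 4 - 1) / 4)).toNat else 0) = pvK cs := by
      unfold pvK; split <;> omega
    rw [hcount]
    apply List.map_congr_left
    intro k _
    simp only [Function.comp]
    have h1 : (0 + 4 * (k : Int)) = ((4 * k : Nat) : Int) := by push_cast; ring
    have h2 : (0 + 4 * (k : Int) + 4) = ((4 * k + 4 : Nat) : Int) := by push_cast; ring
    rw [h2, h1, PySem.Chars.slice_eq_listSlice, PySem.List.slice_natCast]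
    unfold pvChunk
    congr 1
    omega
  unfold pvLinesOf
  rw [hchunks]
  have hlen : ((((List.range (pvK cs)).map (pvChunk cs)).length : Nat) : Int)
      = ((pvK cs : Nat) : Int) := by simp
  rw [hlen, PySem.List.pyRange_of_pos 0 ((pvK cs : Nat) : Int) (by norm_num), List.map_map]
  have hcount : (if (0:Int) < ((pvK cs : Nat) : Int)
      then ((((pvK cs : Nat) : Int) - 0 + 5 - 1) / 5).toNat else 0) = (pvK cs + 4) / 5 := by
    split <;> omega
  rw [hcount, pvB, pvLines]
  congr 1
  apply List.map_congr_left
  intro q _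
  simp only [Function.comp]
  have h1 : (0 + 5 * (q : Int)) = ((5 * q : Nat) : Int) := by push_cast; ring
  have h2 : (0 + 5 * (q : Int) + 5) = ((5 * q + 5 : Nat) : Int) := by push_cast; ring
  rw [h2, h1, PySem.List.slice_natCast]
  congr 2
  omega

-- ===== VERDICT (by name: the statement is the Claim_ definition above) =====
theorem format_fpr_spec : Claim_equal_format_fpr := by
  intro fpr _
  unfold Spec_format_fpr format_fpr format_fpr_alt
  rw [pvA_port, pvB_port, pvMain]
  by_cases h0 : pvK fpr.toList = 0
  · rw [if_pos h0, h0]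
    simp [pvB, pvLines, PySem.Chars.join_nil]
  · rw [if_neg h0]
    congr 1
    unfold pvSep
    split
    · exact pvRstrip_ws _ _ (by decide)
    · exact pvRstrip_ws _ _ (by decide)
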